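-- pv_equiv track=rewrite | github.com/yukikoyanagi/metastructure | frompartialmatrix.py | combinations_repeat
-- ===== SOURCE A (Python) =====
-- from itertools import combinations, product, accumulate
--
-- def combinations_repeat(it, r, n):
--     "Return n-tuple of r-length subsequences of elements from input "
--     "iterable."
--     """
--     combinations_repeat('ABCDE', 2, 2) --> (AB, CD) (AB, CE) (AB, DE)
--                                            (AC, BD) (AC, BE) (AC, DE)
--                                            (AD, BC) (AD, BE) (AD, CE)
--                                            (AE, BC) (AE, BD) (AE, CD)
--                                            (BC, DE) (BD, CE) (BE, CD)
--     """
--     indices = range(len(it))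
--     if r*n > len(it) or r*n==0:
--         return
--     for i in combinations(combinations(indices, r),n):
--         #yield only if the result does not contain duplicates
--         if len([k for j in i for k in j]) \
--            == len({k for j in i for k in j}):
--             res = []
--             for j in i:
--                 subseq = tuple(it[k] for k in j)
--                 res.append(subseq)
--             yield tuple(res)
-- ===== SOURCE B (Python) =====
-- # Backtracking generator: extend with lexicographically later, disjoint r-combinations
-- # instead of scanning every n-subset of all r-combinations and filtering.
-- from itertools import combinations
--
-- def combinations_repeat(it, r, n):
--     "Return n-tuple of r-length subsequences of elements from input iterable."
--     L = len(it)
--     if r <= 0 or n <= 0 or r * n > L: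
--         return
--     cands = list(combinations(range(L), r))
--
--     def pick(cands, used, k):
--         if k == 0:
--             yield []
--             return
--         for i, c in enumerate(cands):
--             if all(x not in used for x in c):
--                 for rest in pick(cands[i + 1:], used + c, k - 1):
--                     yield [c] + rest
--
--     for chosen in pick(cands, (), n):
--         yield tuple(tuple(it[k] for k in j) for j in chosen)
-- ===== Notes on version B (the rewrite author's own statement) =====
-- stated objective: alternative
-- what changed: Replaces A's scan of every n-subset of all r-combinations followed by a global duplicate-count filter with a backtracking recursion that only extends a partial tuple with later candidates disjoint from the indices already used, pruning conflicting branches early.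
-- crash fix: On negative r or n not dismissed by the r*n>len(it)/r*n==0 guard, A raises ValueError from itertools.combinations; B yields nothing (empty result). — e.g. on combinations_repeat("AB", -1, 2): A raises ValueError, B returns []
import Mathlib
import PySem

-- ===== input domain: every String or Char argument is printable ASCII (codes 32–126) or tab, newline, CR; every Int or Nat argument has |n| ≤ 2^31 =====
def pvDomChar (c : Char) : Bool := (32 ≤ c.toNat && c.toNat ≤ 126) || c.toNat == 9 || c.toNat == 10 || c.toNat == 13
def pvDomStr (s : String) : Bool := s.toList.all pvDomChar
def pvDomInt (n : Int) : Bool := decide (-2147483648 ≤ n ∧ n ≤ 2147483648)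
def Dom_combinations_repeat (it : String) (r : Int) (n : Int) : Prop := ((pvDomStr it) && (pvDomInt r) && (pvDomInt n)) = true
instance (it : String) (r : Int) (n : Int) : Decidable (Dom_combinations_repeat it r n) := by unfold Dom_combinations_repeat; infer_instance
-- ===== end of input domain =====

-- B replaces A's scan of ALL n-subsets of all r-combinations (then filtering the disjoint
-- ones) by a backtracking recursion that only extends with later, disjoint r-combinations;
-- objective: alternative/pruning algorithm. Both programs are generators; the
-- equivalence is about the list of yielded values.

-- it[k] for an in-range index k: the 1-character string (shared by both ports: both Pythons
-- evaluate the same expression 'it[k]')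
def pvCharAt (it : String) (k : Int) : String :=
  match PySem.Str.pyGet? it k with
  | some c => String.ofList [c]
  | none => ""

-- itertools.combinations(l, k), in itertools' order (shared: both Pythons call it)
def pvCombos {α : Type} : List α → Nat → List (List α)
  | _, 0 => [[]]
  | [], _ + 1 => []
  | x :: xs, k + 1 => (pvCombos xs k).map (x :: ·) ++ pvCombos xs (k + 1)

-- ===== PORT A =====
def combinations_repeat (it : String) (r : Int) (n : Int) : List (List (List String)) :=
  let len := PySem.Str.len it
  if r * n > len ∨ r * n = 0 then []
  else
    let indices := PySem.List.pyRange 0 len 1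
    ((pvCombos (pvCombos indices r.toNat) n.toNat).filter
        (fun i => (i.flatMap id).length == (PySem.Set.ofList (i.flatMap id)).length)).map
      (fun i => i.map (fun j => j.map (fun k => pvCharAt it k)))

-- ===== PORT B =====
-- pick(cands, used, k): k-tuples of pairwise-later candidates, each disjoint from 'used'
def pvPick : List (List Int) → List Int → Nat → List (List (List Int))
  | _, _, 0 => [[]]
  | [], _, _ + 1 => []
  | c :: cs, used, k + 1 =>
      (if c.all (fun x => !used.contains x) then (pvPick cs (used ++ c) k).map (c :: ·) else [])
        ++ pvPick cs used (k + 1)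

def combinations_repeat_alt (it : String) (r : Int) (n : Int) : List (List (List String)) :=
  let len := PySem.Str.len it
  if r ≤ 0 ∨ n ≤ 0 ∨ r * n > len then []
  else
    let cands := pvCombos (PySem.List.pyRange 0 len 1) r.toNat
    (pvPick cands [] n.toNat).map
      (fun i => i.map (fun j => j.map (fun k => pvCharAt it k)))

-- ===== PRECONDITION & SPEC =====
-- Pre_ excludes exactly the inputs on which A raises ValueError: a negative r or n that
-- reaches itertools.combinations (i.e. not dismissed by A's 'r*n > len or r*n == 0' guard).
def Pre_combinations_repeat (it : String) (r : Int) (n : Int) : Prop :=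
  (0 ≤ r ∧ 0 ≤ n) ∨ r * n > PySem.Str.len it ∨ r * n = 0
instance (it : String) (r : Int) (n : Int) : Decidable (Pre_combinations_repeat it r n) := by
  unfold Pre_combinations_repeat; infer_instance

def pvWitness_combinations_repeat : String × Int × Int := ("ABCDE", 2, 2)

-- A raises ValueError when r or n is negative and the guard does not return first; B yields nothing there.
def Raises_combinations_repeat (it : String) (r : Int) (n : Int) : Prop :=
  (r < 0 ∨ n < 0) ∧ r * n ≤ PySem.Str.len it ∧ r * n ≠ 0
instance (it : String) (r : Int) (n : Int) : Decidable (Raises_combinations_repeat it r n) := by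
  unfold Raises_combinations_repeat; infer_instance
def pvRaiseWitness_combinations_repeat : String × Int × Int := ("AB", -1, 2)
def pvRaiseWitnessOut_combinations_repeat : List (List (List String)) := []

def Spec_combinations_repeat (it : String) (r : Int) (n : Int) (out : List (List (List String))) : Prop := out = combinations_repeat_alt it r n
instance (it : String) (r : Int) (n : Int) (out : List (List (List String))) : Decidable (Spec_combinations_repeat it r n out) := by unfold Spec_combinations_repeat; infer_instance

-- ===== CLAIM (what is proved, stated in full; the proofs are below) =====
def Claim_equal_combinations_repeat : Prop := ∀ (it : String) (r : Int) (n : Int), Dom_combinations_repeat it r n → Pre_combinations_repeat it r n → Spec_combinations_repeat it r n (combinations_repeat it r n)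

def Claim_raises_combinations_repeat : Prop := (∀ (it : String) (r : Int) (n : Int), Dom_combinations_repeat it r n → Raises_combinations_repeat it r n → ¬ Pre_combinations_repeat it r n) ∧ (Dom_combinations_repeat (pvRaiseWitness_combinations_repeat.1) (pvRaiseWitness_combinations_repeat.2.1) (pvRaiseWitness_combinations_repeat.2.2) ∧ Raises_combinations_repeat (pvRaiseWitness_combinations_repeat.1) (pvRaiseWitness_combinations_repeat.2.1) (pvRaiseWitness_combinations_repeat.2.2) ∧ combinations_repeat_alt (pvRaiseWitness_combinations_repeat.1) (pvRaiseWitness_combinations_repeat.2.1) (pvRaiseWitness_combinations_repeat.2.2) = pvRaiseWitnessOut_combinations_repeat)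

-- ===== LEMMAS AND PROOFS =====

-- Python's "len(flat) == len(set(flat))" is exactly the no-duplicates test
theorem pvLenSet_eq (l : List Int) :
    (l.length == (PySem.Set.ofList l).length) = decide l.Nodup := by
  by_cases h : l.Nodup
  · have hperm : (PySem.Set.ofList l).Perm l := by
      rw [List.perm_ext_iff_of_nodup (PySem.Set.nodup_ofList l) h]
      intro a; exact PySem.Set.mem_ofList l a
    simp [h, hperm.length_eq]
  · simp [h]
    intro hlen
    apply h
    have hcard : l.toFinset.card = l.length := by
      have h1 : (PySem.Set.ofList l).toFinset = l.toFinset := by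
        ext a; simp [PySem.Set.mem_ofList]
      have h2 := List.toFinset_card_of_nodup (PySem.Set.nodup_ofList l)
      rw [h1] at h2
      omega
    have := Multiset.toFinset_card_eq_card_iff_nodup (m := (l : Multiset Int))
    simp at this
    exact this.mp hcard

-- every member of pvCombos l k is a sublist of l
theorem pvCombos_sublist {α : Type} (l : List α) (k : Nat) :
    ∀ c ∈ pvCombos l k, c.Sublist l := by
  induction l generalizing k with
  | nil => cases k <;>simp [pvCombos]
  | cons x xs ih =>
    cases k with
    | zero => simp [pvCombos]
    | succ k =>
      intro c hc
      simp [pvCombos] at hc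
      rcases hc with ⟨c', hc', rfl⟩ | hc
      · exact (ih k c' hc').cons₂ x
      · exact (ih (k + 1) c hc).cons x

-- backtracking = generate-then-filter (over any candidate list of Nodup combos)
theorem pvPick_eq (cs : List (List Int)) (used : List Int) (k : Nat)
    (hcs : ∀ c ∈ cs, c.Nodup) (hu : used.Nodup) :
    pvPick cs used k =
      (pvCombos cs k).filter (fun i => decide ((used ++ i.flatMap id).Nodup)) := by
  induction cs generalizing used k with
  | nil =>
    cases k with
    | zero => simp [pvPick, pvCombos, hu]
    | succ k => simp [pvPick, pvCombos]
  | cons c cs ih =>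
    cases k with
    | zero => simp [pvPick, pvCombos, hu]
    | succ k =>
      have hc : c.Nodup := hcs c (by simp)
      have hcs' : ∀ d ∈ cs, d.Nodup := fun d hd => hcs d (by simp [hd])
      show (if c.all (fun x => !used.contains x) then
              (pvPick cs (used ++ c) k).map (c :: ·) else [])
            ++ pvPick cs used (k + 1)
          = ((pvCombos cs k).map (c :: ·) ++ pvCombos cs (k + 1)).filter
              (fun i => decide ((used ++ i.flatMap id).Nodup))
      rw [List.filter_append, List.filter_map]
      congr 1
      · by_cases hdisj : c.all (fun x => !used.contains x)
        · have hdis : ∀ a ∈ used, ∀ b ∈ c, a ≠ b := by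
            intro a ha b hb heq
            have hb' := List.all_eq_true.mp hdisj b hb
            simp at hb'
            exact hb' (heq ▸ ha)
          have huc : (used ++ c).Nodup := List.nodup_append.mpr ⟨hu, hc, hdis⟩
          rw [if_pos hdisj, ih (used ++ c) k hcs' huc]
          congr 1
          apply List.filter_congr
          intro i _
          simp [Function.comp, List.append_assoc]
        · rw [if_neg hdisj]
          have hx : ∃ x ∈ c, x ∈ used := by
            by_contra hno
            push Not at hno
            apply hdisj
            rw [List.all_eq_true]
            intro a ha
            simp
            exact hno a ha
          obtain ⟨x, hxc, hxu⟩ := hx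
          symm
          rw [List.map_eq_nil_iff, List.filter_eq_nil_iff]
          intro i _
          simp only [Function.comp, decide_eq_true_eq]
          intro hnd
          rw [List.flatMap_cons, id, ← List.append_assoc] at hnd
          have huc : (used ++ c).Nodup := hnd.sublist (List.sublist_append_left _ _)
          exact (List.nodup_append.mp huc).2.2 x hxu x hxc rfl
      · exact ih used (k + 1) hcs' hu

-- ===== VERDICT (by name: the statement is the Claim_ definition above) =====
theorem combinations_repeat_spec : Claim_equal_combinations_repeat := by
  intro it r n _ hpre
  unfold Spec_combinations_repeat combinations_repeat combinations_repeat_alt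
  simp only []
  set L := PySem.Str.len it with hL
  have hL0 : 0 ≤ L := by
    rw [hL, PySem.Str.len_eq]
    positivity
  by_cases hA : r * n > L ∨ r * n = 0
  · rw [if_pos hA, if_pos]
    rcases hA with h | h
    · right; right; exact h
    · rcases mul_eq_zero.mp h with h | h
      · left; omega
      · right; left; omega
  · rw [if_neg hA]
    push Not at hA
    obtain ⟨h1, h2⟩ := hA
    have hrn : 0 < r ∧ 0 < n := by
      rcases hpre with ⟨hr, hn⟩ | h | h
      · constructor
        · rcases lt_or_eq_of_le hr with h | h
          · exact h
          · exfalso; apply h2; rw [← h]; ring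
        · rcases lt_or_eq_of_le hn with h | h
          · exact h
          · exfalso; apply h2; rw [← h]; ring
      · omega
      · exact absurd h h2
    rw [if_neg (by omega)]
    have hnodup : ∀ c ∈ pvCombos (PySem.List.pyRange 0 L 1) r.toNat, c.Nodup := by
      intro c hc
      exact (PySem.List.nodup_pyRange_one 0 L).sublist (pvCombos_sublist _ _ c hc)
    rw [pvPick_eq _ [] n.toNat hnodup List.nodup_nil]
    congr 1
    apply List.filter_congr
    intro i _
    rw [pvLenSet_eq]
    simp

def combinations_repeat_raises : Claim_raises_combinations_repeat := by
  unfold Claim_raises_combinations_repeat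
  constructor
  · intro it r n _ hraise hpre
    obtain ⟨hneg, hle, hne⟩ := hraise
    rcases hpre with ⟨hr, hn⟩ | h | h
    · omega
    · omega
    · exact hne h
  · exact ⟨by decide, by decide, by decide⟩
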